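-- pv_equiv track=rewrite | github.com/miliar/Code_Jam_Webscraper | Solutions_in_python/Problem_118/fairSquare.py | hallaPalindromo
-- ===== SOURCE A (Python) =====
-- def cuadradoPalindromos(listaPalindromo):
--     listResult=[]
--     for i in listaPalindromo:
--         listResult.append(i*i)
--     return listResult
--
-- def hallaPalindromo(minNum, maxNum):
--     list = range(minNum, maxNum + 1)
--     listPalindromo = []
--     listaPalindromoCuadrado = []
--     for i in list:
--         cad = str(i)
--         bandera = False
--         if len(cad) == 1:
--             listPalindromo.append(i);
--         else:
--             if len(cad) % 2 == 0:
--                 pivote = int(len(cad) / 2)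
--                 bandera = validaPalindromo(pivote, cad)
--             else:
--                 pivote = int(len(cad) / 2)
--                 bandera = validaPalindromo(pivote, cad[:pivote] + cad[pivote + 1:])
--
--         if(bandera == True):
--             listPalindromo.append(i)
--     listaPalindromoCuadrado = cuadradoPalindromos(listPalindromo)
--
--     listaPalindromoAux = []
--     for i in listaPalindromoCuadrado:
--         cad = str(i)
--         bandera = False
--         if len(cad) == 1:
--             listaPalindromoAux.append(i);
--         else:
--             if len(cad) % 2 == 0:
--                 pivote = int(len(cad) / 2)
--                 bandera = validaPalindromo(pivote, cad)
--             else: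
--                 pivote = int(len(cad) / 2)
--                 bandera = validaPalindromo(pivote, cad[:pivote] + cad[pivote + 1:])
--
--         if(bandera == True):
--             listaPalindromoAux.append(i)
--
--     return len(listaPalindromoAux)
--
-- def validaPalindromo(pivote, cadena):
--     j = 0
--     for i in range(1, pivote + 1):
--         if(cadena[pivote - i] != cadena[pivote + j]):
--             return False
--         j += 1
--     return True
-- ===== SOURCE B (Python) =====
-- def hallaPalindromo(minNum, maxNum):
--     # Single counting pass; negative numbers can never be palindromes ('-' prefix),
--     # so the scan starts at max(minNum, 0).
--     count = 0
--     for i in range(max(minNum, 0), maxNum + 1):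
--         s = str(i)
--         if s == s[::-1]:
--             t = str(i * i)
--             if t == t[::-1]:
--                 count += 1
--     return count
-- ===== Notes on version B (the rewrite author's own statement) =====
-- stated objective: simpler
-- what changed: Replaces A's three list-building passes (filter palindromes, square them, filter again) and its hand-written index/pivot character loop by a single counting pass that compares each decimal string with its reversal and starts the scan at max(minNum, 0), since negative numbers are never palindromes.
import Mathlib
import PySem

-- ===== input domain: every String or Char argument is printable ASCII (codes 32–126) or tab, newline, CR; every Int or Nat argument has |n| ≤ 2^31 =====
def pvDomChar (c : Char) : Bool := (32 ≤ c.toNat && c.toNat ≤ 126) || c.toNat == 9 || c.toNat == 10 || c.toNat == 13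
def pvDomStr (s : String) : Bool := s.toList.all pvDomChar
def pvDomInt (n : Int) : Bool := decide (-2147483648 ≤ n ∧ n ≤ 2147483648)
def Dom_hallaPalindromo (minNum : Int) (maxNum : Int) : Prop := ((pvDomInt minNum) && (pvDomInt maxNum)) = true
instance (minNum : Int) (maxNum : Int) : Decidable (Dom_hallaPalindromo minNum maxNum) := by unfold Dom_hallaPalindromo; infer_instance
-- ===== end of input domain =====

-- B replaces A's three list-building passes and hand-written pivot scan with a single counting
-- pass using a reversal comparison, starting at max(minNum, 0) since negatives are never palindromes (objective: simpler).

-- ===== PORT A =====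

-- helper cuadradoPalindromos: appends i*i for each i
def cuadradoPalindromos (listaPalindromo : List Int) : List Int :=
  listaPalindromo.foldl (fun listResult i => listResult ++ [i * i]) []

-- the 'for i in range(1, pivote+1)' loop of validaPalindromo, with early return False;
-- fuel = number of iterations, i and j carried as in the Python.
-- The '| _, _ => false' arm is an IndexError in Python; it is never reached from
-- hallaPalindromo's calls (indices stay in range there).
def validaGo (cadena : List Char) (pivote : Int) : Nat → Int → Int → Bool
  | 0, _, _ => true
  | n + 1, i, j =>
    match PySem.List.pyGet? cadena (pivote - i), PySem.List.pyGet? cadena (pivote + j) with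
    | some a, some b => if a ≠ b then false else validaGo cadena pivote n (i + 1) (j + 1)
    | _, _ => false

def validaPalindromo (pivote : Int) (cadena : List Char) : Bool :=
  validaGo cadena pivote ((pivote + 1) - 1).toNat 1 0

-- strings are carried as List Char (PySem.Chars side); str(i) = PySem.Int.toChars.
-- pivote = int(len(cad)/2) is exact float division then truncation, = len/2 (Nat division) since len ≥ 0.
def hallaPalindromo (minNum : Int) (maxNum : Int) : Int :=
  let list := PySem.List.pyRange minNum (maxNum + 1) 1
  let listPalindromo : List Int :=
    list.foldl (fun listPalindromo i =>
      let cad := PySem.Int.toChars i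
      if cad.length = 1 then
        listPalindromo ++ [i]
      else
        let bandera :=
          if cad.length % 2 = 0 then
            validaPalindromo ((cad.length / 2 : Nat) : Int) cad
          else
            let pivote : Int := ((cad.length / 2 : Nat) : Int)
            validaPalindromo pivote
              (PySem.List.slice cad none (some pivote) ++ PySem.List.slice cad (some (pivote + 1)) none)
        if bandera then listPalindromo ++ [i] else listPalindromo) []
  let listaPalindromoCuadrado := cuadradoPalindromos listPalindromo
  let listaPalindromoAux : List Int :=
    listaPalindromoCuadrado.foldl (fun listaPalindromoAux i =>
      let cad := PySem.Int.toChars i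
      if cad.length = 1 then
        listaPalindromoAux ++ [i]
      else
        let bandera :=
          if cad.length % 2 = 0 then
            validaPalindromo ((cad.length / 2 : Nat) : Int) cad
          else
            let pivote : Int := ((cad.length / 2 : Nat) : Int)
            validaPalindromo pivote
              (PySem.List.slice cad none (some pivote) ++ PySem.List.slice cad (some (pivote + 1)) none)
        if bandera then listaPalindromoAux ++ [i] else listaPalindromoAux) []
  (listaPalindromoAux.length : Int)

-- ===== PORT B =====

-- s[::-1] is s.reverse (PySem.List.slice?_none_none_neg_one)
def hallaPalindromo_alt (minNum : Int) (maxNum : Int) : Int :=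
  (PySem.List.pyRange (max minNum 0) (maxNum + 1) 1).foldl
    (fun count i =>
      let s := PySem.Int.toChars i
      if s == s.reverse then
        let t := PySem.Int.toChars (i * i)
        if t == t.reverse then count + 1 else count
      else count) 0

-- ===== PRECONDITION & SPEC =====
def Spec_hallaPalindromo (minNum : Int) (maxNum : Int) (out : Int) : Prop := out = hallaPalindromo_alt minNum maxNum
instance (minNum : Int) (maxNum : Int) (out : Int) : Decidable (Spec_hallaPalindromo minNum maxNum out) := by unfold Spec_hallaPalindromo; infer_instance

-- ===== CLAIM (what is proved, stated in full; the proofs are below) =====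
def Claim_equal_hallaPalindromo : Prop := ∀ (minNum : Int) (maxNum : Int), Dom_hallaPalindromo minNum maxNum → Spec_hallaPalindromo minNum maxNum (hallaPalindromo minNum maxNum)

-- ===== LEMMAS AND PROOFS =====

-- A's per-element acceptance decision, factored out for the proof
def keepA (cad : List Char) : Bool :=
  if cad.length = 1 then
    true
  else if cad.length % 2 = 0 then
    validaPalindromo ((cad.length / 2 : Nat) : Int) cad
  else
    validaPalindromo ((cad.length / 2 : Nat) : Int)
      (PySem.List.slice cad none (some ((cad.length / 2 : Nat) : Int)) ++
       PySem.List.slice cad (some (((cad.length / 2 : Nat) : Int) + 1)) none)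

-- B's per-element test, factored out for the proof
def palB (n : Int) : Bool :=
  let s := PySem.Int.toChars n
  s == s.reverse

-- the loop of validaPalindromo compares x.reverse with y, position by position
theorem validaGo_spec (x y : List Char) :
    ∀ (n t : Nat), x.length = t + n → y.length = t + n →
      validaGo (x ++ y) (x.length : Int) n (1 + (t : Int)) (t : Int)
        = (x.reverse.drop t == y.drop t) := by
  intro n
  induction n with
  | zero =>
      intro t hx hy
      have h1 : x.reverse.drop t = [] := List.drop_eq_nil_of_le (by simp; omega)
      have h2 : y.drop t = [] := List.drop_eq_nil_of_le (by omega)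
      simp [validaGo, h1, h2]
  | succ n ih =>
      intro t hx hy
      have ht : t < x.length := by omega
      have hidx1 : (x.length : Int) - (1 + (t : Int)) = ((x.length - 1 - t : Nat) : Int) := by omega
      have hidx2 : (x.length : Int) + (t : Int) = ((x.length + t : Nat) : Int) := by omega
      have h1 : PySem.List.pyGet? (x ++ y) ((x.length : Int) - (1 + (t : Int)))
          = some x[x.length - 1 - t] := by
        rw [hidx1, PySem.List.pyGet?_natCast]
        rw [List.getElem?_append_left (by omega)]
        exact List.getElem?_eq_getElem (by omega)
      have h2 : PySem.List.pyGet? (x ++ y) ((x.length : Int) + (t : Int))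
          = some y[t] := by
        rw [hidx2, PySem.List.pyGet?_natCast]
        rw [List.getElem?_append_right (by omega)]
        simp only [Nat.add_sub_cancel_left]
        exact List.getElem?_eq_getElem (by omega)
      have hrev : x.reverse.drop t = x[x.length - 1 - t] :: x.reverse.drop (t + 1) := by
        have h' : t < x.reverse.length := by simpa using ht
        rw [← List.getElem_cons_drop h', List.getElem_reverse]
      have hy' : y.drop t = y[t] :: y.drop (t + 1) := by
        rw [← List.getElem_cons_drop (by omega)]
      simp only [validaGo, h1, h2]
      rw [hrev, hy']
      by_cases hc : x[x.length - 1 - t] = y[t]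
      · rw [if_neg (by simpa using hc)]
        rw [show (1 + (t : Int)) + 1 = 1 + ((t + 1 : Nat) : Int) by push_cast; ring,
            show ((t : Int)) + 1 = ((t + 1 : Nat) : Int) by push_cast; ring]
        rw [ih (t + 1) (by omega) (by omega), hc]
        simp only [List.cons_beq_cons, beq_self_eq_true, Bool.true_and]
      · rw [if_pos hc]
        have hcf : (x[x.length - 1 - t] == y[t]) = false := by
          simp [hc]
        rw [List.cons_beq_cons, hcf, Bool.false_and]

theorem valida_even (x y : List Char) (h : y.length = x.length) :
    validaPalindromo (x.length : Int) (x ++ y) = (x.reverse == y) := by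
  unfold validaPalindromo
  have hn : (((x.length : Int) + 1) - 1).toNat = x.length := by omega
  have := validaGo_spec x y x.length 0 (by omega) (by omega)
  simpa [hn] using this

theorem rev_eq_even (x y : List Char) (h : y.length = x.length) :
    ((x ++ y) == (x ++ y).reverse) = (x.reverse == y) := by
  rw [Bool.eq_iff_iff]
  simp only [beq_iff_eq]
  constructor
  · intro hp
    rw [List.reverse_append] at hp
    have := List.append_inj hp (by simpa using h.symm)
    rw [this.1]; simp
  · intro hp
    rw [List.reverse_append, ← hp]
    simp

theorem rev_eq_odd (x y : List Char) (m : Char) (h : y.length = x.length) :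
    ((x ++ m :: y) == (x ++ m :: y).reverse) = (x.reverse == y) := by
  rw [Bool.eq_iff_iff]
  simp only [beq_iff_eq]
  constructor
  · intro hp
    rw [List.reverse_append, List.reverse_cons] at hp
    have hp' : x ++ m :: y = y.reverse ++ m :: x.reverse := by
      rw [hp]; simp
    have := List.append_inj hp' (by simpa using h.symm)
    rw [this.1]; simp
  · intro hp
    rw [List.reverse_append, List.reverse_cons, ← hp]
    simp

-- A's even-length branch, on the decomposition cad = x ++ y
theorem keep_even (x y : List Char) (h : y.length = x.length) :
    validaPalindromo ((((x ++ y).length / 2 : Nat) : Int)) (x ++ y)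
      = ((x ++ y) == (x ++ y).reverse) := by
  have hlen : (x ++ y).length / 2 = x.length := by
    simp only [List.length_append, h]; omega
  rw [hlen, valida_even x y h, rev_eq_even x y h]

-- A's odd-length branch, on the decomposition cad = x ++ m :: y (middle char removed)
theorem keep_odd (x y : List Char) (m : Char) (h : y.length = x.length) :
    validaPalindromo ((((x ++ m :: y).length / 2 : Nat) : Int)) (x ++ y)
      = ((x ++ m :: y) == (x ++ m :: y).reverse) := by
  have hlen : (x ++ m :: y).length / 2 = x.length := by
    simp only [List.length_append, List.length_cons, h]; omega
  rw [hlen, valida_even x y h, rev_eq_odd x y m h]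

-- A's acceptance decision is exactly the palindrome test
theorem keepA_eq (cad : List Char) : keepA cad = (cad == cad.reverse) := by
  by_cases h1 : cad.length = 1
  · obtain ⟨c, hc⟩ : ∃ c, cad = [c] := by
      match cad, h1 with
      | [c], _ => exact ⟨c, rfl⟩
    simp [keepA, hc]
  · by_cases h2 : cad.length % 2 = 0
    · -- even length: cad = take p ++ drop p, both halves of length p
      obtain ⟨x, y, hxy, hl⟩ : ∃ x y, cad = x ++ y ∧ y.length = x.length :=
        ⟨cad.take (cad.length / 2), cad.drop (cad.length / 2),
         (List.take_append_drop _ cad).symm, by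
          simp only [List.length_take, List.length_drop]; omega⟩
      subst hxy
      rw [keepA, if_neg h1, if_pos h2, keep_even x y hl]
    · -- odd length ≥ 3: cad = x ++ m :: y with |x| = |y| = len/2
      have hlen3 : 3 ≤ cad.length ∨ cad.length = 0 := by omega
      rcases hlen3 with hlen3 | hlen0
      swap
      · -- impossible: length 0 is even
        omega
      set p := cad.length / 2 with hp
      have hplt : p < cad.length := by omega
      obtain ⟨x, y, m, hxy, hlx, hly⟩ :
          ∃ x y m, cad = x ++ m :: y ∧ x.length = p ∧ y.length = p :=
        ⟨cad.take p, cad.drop (p + 1), cad[p], by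
          conv_lhs => rw [← List.take_append_drop p cad]
          rw [← List.getElem_cons_drop hplt], by
          simp only [List.length_take]; omega, by
          simp only [List.length_drop]; omega⟩
      have hT : PySem.List.slice cad none (some ((p : Nat) : Int)) = cad.take p :=
        PySem.List.slice_to_natCast cad p
      have hD : PySem.List.slice cad (some (((p : Nat) : Int) + 1)) none = cad.drop (p + 1) := by
        rw [show ((p : Nat) : Int) + 1 = ((p + 1 : Nat) : Int) by push_cast; ring]
        exact PySem.List.slice_from_natCast cad (p + 1)
      have htake : cad.take p = x := by rw [hxy, ← hlx]; exact List.take_left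
      have hdrop : cad.drop (p + 1) = y := by
        rw [hxy, ← hlx]
        simp [List.drop_append]
      rw [keepA, if_neg h1, if_neg h2, ← hp, hT, hD, htake, hdrop]
      conv_rhs => rw [hxy]
      have hpl : cad.length / 2 = (x ++ m :: y).length / 2 := by rw [hxy]
      rw [← hp] at hpl
      rw [hpl, keep_odd x y m (by omega)]

-- a negative number's string starts with '-' and ends with a digit: never a palindrome
theorem palB_neg (i : Int) (h : i < 0) : palB i = false := by
  unfold palB
  simp only [PySem.Int.toChars, if_pos h]
  rw [Bool.eq_false_iff]
  intro hbeq
  rw [beq_iff_eq] at hbeq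
  generalize hd : Nat.toDigits 10 i.natAbs = d at hbeq
  have hdpos : 0 < d.length := by
    rw [← hd]; exact Nat.length_toDigits_pos
  obtain ⟨c, ds, rfl⟩ : ∃ c ds, d = c :: ds := by
    cases d with
    | nil => simp at hdpos
    | cons c ds => exact ⟨c, ds, rfl⟩
  have hbeq2 : '-' :: c :: ds = (c :: ds).reverse ++ ['-'] := by
    rw [hbeq, List.reverse_cons]
  have e := congrArg List.getLast? hbeq2
  rw [List.getLast?_concat, List.getLast?_cons_cons] at e
  have hmem : '-' ∈ c :: ds := List.mem_of_getLast? e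
  rw [← hd] at hmem
  have hdig : ('-').isDigit = true :=
    Nat.isDigit_of_mem_toDigits (by norm_num) (by norm_num) hmem
  simp [Char.isDigit] at hdig

-- B's test agrees with A's on every i
theorem palB_eq_keepA (i : Int) : palB i = keepA (PySem.Int.toChars i) := by
  rw [keepA_eq]; rfl

-- the A-side fold body is 'if keepA then append' (stated on the zeta-reduced body)
theorem foldA_body (l : List Int) (acc : List Int) :
    l.foldl (fun acc i =>
      if (PySem.Int.toChars i).length = 1 then
        acc ++ [i]
      else
        if (if (PySem.Int.toChars i).length % 2 = 0 then
              validaPalindromo (((PySem.Int.toChars i).length / 2 : Nat) : Int) (PySem.Int.toChars i)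
            else
              validaPalindromo (((PySem.Int.toChars i).length / 2 : Nat) : Int)
                (PySem.List.slice (PySem.Int.toChars i) none (some (((PySem.Int.toChars i).length / 2 : Nat) : Int)) ++
                 PySem.List.slice (PySem.Int.toChars i) (some ((((PySem.Int.toChars i).length / 2 : Nat) : Int) + 1)) none))
        then acc ++ [i] else acc) acc
      = acc ++ l.filter (fun i => keepA (PySem.Int.toChars i)) := by
  rw [← PySem.List.foldl_append_if_eq_filter (fun i => keepA (PySem.Int.toChars i)) l acc]
  congr 1
  funext acc i
  by_cases h1 : (PySem.Int.toChars i).length = 1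
  · simp [keepA, h1]
  · by_cases h2 : (PySem.Int.toChars i).length % 2 = 0 <;> simp [keepA, h1, h2]

-- the B-side fold body is 'if palB i && palB (i*i) then count+1' (zeta-reduced body)
theorem foldB_body (l : List Int) (a : Int) :
    l.foldl (fun count i =>
      if (PySem.Int.toChars i) == (PySem.Int.toChars i).reverse then
        if (PySem.Int.toChars (i * i)) == (PySem.Int.toChars (i * i)).reverse then count + 1 else count
      else count) a
      = a + (l.countP (fun i => palB i && palB (i * i)) : Int) := by
  rw [← PySem.List.foldl_if_add_one (fun i => palB i && palB (i * i)) l a]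
  congr 1
  funext count i
  by_cases h1 : (PySem.Int.toChars i) == (PySem.Int.toChars i).reverse
  · by_cases h2 : (PySem.Int.toChars (i * i)) == (PySem.Int.toChars (i * i)).reverse <;>
      simp [palB, h1, h2]
  · simp [palB, h1]

-- the two scan ranges count the same: negatives contribute nothing
theorem count_range_eq (minNum maxNum : Int) (Q : Int → Bool)
    (hQ : ∀ i, i < 0 → Q i = false) :
    (PySem.List.pyRange minNum (maxNum + 1) 1).countP Q
      = (PySem.List.pyRange (max minNum 0) (maxNum + 1) 1).countP Q := by
  by_cases hm : 0 ≤ minNum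
  · rw [max_eq_left hm]
  · rw [max_eq_right (by omega)]
    by_cases hb : 0 ≤ maxNum + 1
    · rw [PySem.List.pyRange_one_append minNum 0 (maxNum + 1) (by omega) hb,
        List.countP_append]
      have h0 : (PySem.List.pyRange minNum 0 1).countP Q = 0 := by
        rw [List.countP_eq_zero]
        intro a ha
        rw [PySem.List.mem_pyRange_one] at ha
        simp [hQ a ha.2]
      omega
    · have hA : (PySem.List.pyRange minNum (maxNum + 1) 1).countP Q = 0 := by
        rw [List.countP_eq_zero]
        intro a ha
        rw [PySem.List.mem_pyRange_one] at ha
        simp [hQ a (by omega)]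
      rw [hA, PySem.List.pyRange_one_eq_nil (by omega : maxNum + 1 ≤ (0 : Int)),
        List.countP_nil]

-- ===== VERDICT (by name: the statement is the Claim_ definition above) =====
theorem hallaPalindromo_spec : Claim_equal_hallaPalindromo := by
  intro minNum maxNum _
  unfold Spec_hallaPalindromo hallaPalindromo hallaPalindromo_alt
  simp only [foldA_body, foldB_body, cuadradoPalindromos,
    PySem.List.foldl_append_singleton_eq_map, List.nil_append]
  rw [← List.countP_eq_length_filter, List.countP_map, List.countP_filter]
  have hP : ∀ i : Int,
      (((fun i => keepA (PySem.Int.toChars i)) ∘ fun i => i * i) i &&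
        keepA (PySem.Int.toChars i)) = (palB i && palB (i * i)) := by
    intro i
    simp only [Function.comp, ← palB_eq_keepA]
    exact Bool.and_comm _ _
  rw [List.countP_congr (fun x _ => by rw [hP x])]
  rw [count_range_eq minNum maxNum _ (fun i hi => by simp [palB_neg i hi])]
  omega
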